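-- pv_equiv track=rewrite | github.com/NicolasBizzozzero/AdventOfCode-2023 | src/problems/year2023/day10_pipe_maze.py | is_enclosed
-- ===== SOURCE A (Python) =====
-- def is_enclosed(tile: tuple[int, int], path_loop: dict, sketch: list[str]):
--     """Follows the Even-Odd rule. Draw any line starting from the tile and going outside the loop and count the number
--     of walls it crosses. If it crosses an odd number of walls, then the tile is enclosed inside the loop.
--     """
--     winding_number = 0
--
--     for y in range(tile[1] - 1, -1, -1):
--         position = (tile[0], y)
--         if position in path_loop.values():
--             pipe = get_symbol(sketch=sketch, position=position)
--             if pipe in "|JL":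
--                 winding_number += 1
--
--     return winding_number % 2 == 1
--
-- def get_symbol(sketch: list[str], position: tuple[int, int]) -> str:
--     return sketch[position[0]][position[1]]
-- ===== SOURCE B (Python) =====
-- def is_enclosed(tile, path_loop, sketch):
--     inside = False
--     for pos in set(path_loop.values()):
--         if pos[0] == tile[0] and 0 <= pos[1] < tile[1]:
--             if sketch[pos[0]][pos[1]] in "|JL":
--                 inside = not inside
--     return inside
-- ===== Notes on version B (the rewrite author's own statement) =====
-- stated objective: faster
-- what changed: Instead of casting a ray and testing every cell (tile[0], y) for y below the tile against path_loop.values() while accumulating an integer winding number, B makes one pass over the distinct loop cells themselves and flips a boolean parity flag whenever a cell on the tile's row, strictly below its column, carries a wall symbol; no counter and no final modulo.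
import Mathlib
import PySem

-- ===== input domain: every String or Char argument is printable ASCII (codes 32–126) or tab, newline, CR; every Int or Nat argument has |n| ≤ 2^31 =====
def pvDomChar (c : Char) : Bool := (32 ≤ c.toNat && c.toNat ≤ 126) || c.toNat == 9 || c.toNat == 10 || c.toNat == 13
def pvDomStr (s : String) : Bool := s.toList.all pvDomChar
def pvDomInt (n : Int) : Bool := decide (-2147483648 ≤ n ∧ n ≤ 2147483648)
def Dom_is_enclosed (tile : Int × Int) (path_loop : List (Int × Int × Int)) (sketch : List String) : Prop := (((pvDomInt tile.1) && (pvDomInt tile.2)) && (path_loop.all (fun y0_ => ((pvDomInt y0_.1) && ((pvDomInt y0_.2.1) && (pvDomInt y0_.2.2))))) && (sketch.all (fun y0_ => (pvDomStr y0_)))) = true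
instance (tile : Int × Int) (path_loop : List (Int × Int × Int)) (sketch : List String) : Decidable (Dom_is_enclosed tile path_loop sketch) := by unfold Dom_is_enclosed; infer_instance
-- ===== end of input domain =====

-- B flips a boolean parity flag over one pass of the distinct loop cells instead of A's integer
-- winding-number count along the ray below the tile: simpler, no counter and no final modulo.
-- Pre_ excludes exactly the inputs where the Python A raises IndexError; B raises there too.

-- ===== PORT A =====
-- get_symbol(sketch, position) = sketch[position[0]][position[1]]; none = IndexError
def pvGetSymbol (sketch : List String) (position : Int × Int) : Option Char :=
  match PySem.List.pyGet? sketch position.1 with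
  | none => none
  | some row => PySem.Str.pyGet? row position.2

def is_enclosed (tile : Int × Int) (path_loop : List (Int × Int × Int)) (sketch : List String) : Bool :=
  -- winding_number accumulated down the ray y = tile[1]-1 .. 0; Option models the possible IndexError
  match (PySem.List.pyRange (tile.2 - 1) (-1) (-1)).foldl
      (fun acc y =>
        match acc with
        | none => none
        | some n =>
          if (tile.1, y) ∈ PySem.Dict.values (PySem.Dict.ofList path_loop) then
            match pvGetSymbol sketch (tile.1, y) with
            | none => none
            | some c => if c ∈ ['|', 'J', 'L'] then some (n + 1) else some n
          else some n)
      (some (0 : Int)) with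
  | some n => n % 2 == 1
  | none => false  -- unreachable under Pre_is_enclosed

-- ===== PORT B =====
def is_enclosed_alt (tile : Int × Int) (path_loop : List (Int × Int × Int)) (sketch : List String) : Bool :=
  -- 'inside' parity flag toggled once per wall cell of set(path_loop.values()) on the ray
  ((PySem.Set.ofList (PySem.Dict.values (PySem.Dict.ofList path_loop))).foldl
      (fun acc pos =>
        acc.bind (fun inside =>
          if pos.1 == tile.1 && decide (0 ≤ pos.2) && decide (pos.2 < tile.2) then
            ((PySem.List.pyGet? sketch pos.1).bind
                (fun row => PySem.Str.pyGet? row pos.2)).map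
              (fun c => if c ∈ ['|', 'J', 'L'] then !inside else inside)
          else some inside))
      (some false)).getD false  -- the none case is unreachable under Pre_is_enclosed

-- ===== PRECONDITION & SPEC =====
-- Pre_ excludes exactly the inputs where Python A raises IndexError: some loop cell on the tile's row,
-- strictly below the tile's column and with non-negative column, indexes outside the sketch.
def Pre_is_enclosed (tile : Int × Int) (path_loop : List (Int × Int × Int)) (sketch : List String) : Prop :=
  ∀ pos ∈ PySem.Dict.values (PySem.Dict.ofList path_loop),
    pos.1 = tile.1 → 0 ≤ pos.2 → pos.2 < tile.2 →
    ((PySem.List.pyGet? sketch pos.1).bind (fun row => PySem.Str.pyGet? row pos.2)).isSome = true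
instance (tile : Int × Int) (path_loop : List (Int × Int × Int)) (sketch : List String) : Decidable (Pre_is_enclosed tile path_loop sketch) := by unfold Pre_is_enclosed; infer_instance

def pvWitness_is_enclosed : (Int × Int) × (List (Int × Int × Int)) × List String :=
  ((0, 1), [(0, (0, 0)), (1, (0, 2)), (2, (1, 1))], ["|J|"])

def Spec_is_enclosed (tile : Int × Int) (path_loop : List (Int × Int × Int)) (sketch : List String) (out : Bool) : Prop := out = is_enclosed_alt tile path_loop sketch
instance (tile : Int × Int) (path_loop : List (Int × Int × Int)) (sketch : List String) (out : Bool) : Decidable (Spec_is_enclosed tile path_loop sketch out) := by unfold Spec_is_enclosed; infer_instance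

-- ===== CLAIM (what is proved, stated in full; the proofs are below) =====
def Claim_equal_is_enclosed : Prop := ∀ (tile : Int × Int) (path_loop : List (Int × Int × Int)) (sketch : List String), Dom_is_enclosed tile path_loop sketch → Pre_is_enclosed tile path_loop sketch → Spec_is_enclosed tile path_loop sketch (is_enclosed tile path_loop sketch)

-- ===== LEMMAS AND PROOFS =====

-- whether the sketch symbol at pos is a wall ('|', 'J' or 'L'); false on IndexError
def pvPipeAt (sketch : List String) (pos : Int × Int) : Bool :=
  match pvGetSymbol sketch pos with
  | some c => decide (c ∈ ['|', 'J', 'L'])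
  | none => false

-- named copies of the two ports' step functions (definitionally equal to the lambdas in the ports)
def pvStepA (vals : List (Int × Int)) (sketch : List String) (t1 : Int)
    (acc : Option Int) (y : Int) : Option Int :=
  match acc with
  | none => none
  | some n =>
    if (t1, y) ∈ vals then
      match pvGetSymbol sketch (t1, y) with
      | none => none
      | some c => if c ∈ ['|', 'J', 'L'] then some (n + 1) else some n
    else some n

def pvStepB (sketch : List String) (t1 t2 : Int)
    (acc : Option Bool) (pos : Int × Int) : Option Bool :=
  acc.bind (fun inside =>
    if pos.1 == t1 && decide (0 ≤ pos.2) && decide (pos.2 < t2) then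
      ((PySem.List.pyGet? sketch pos.1).bind
          (fun row => PySem.Str.pyGet? row pos.2)).map
        (fun c => if c ∈ ['|', 'J', 'L'] then !inside else inside)
    else some inside)

-- A's ray fold computes a count, provided every loop cell it meets has a symbol
theorem pv_foldA (vals : List (Int × Int)) (sketch : List String) (t1 : Int)
    (l : List Int) (n : Int)
    (h : ∀ y ∈ l, (t1, y) ∈ vals → (pvGetSymbol sketch (t1, y)).isSome = true) :
    l.foldl (pvStepA vals sketch t1) (some n)
    = some (n + (l.countP (fun y => decide ((t1, y) ∈ vals ∧ pvPipeAt sketch (t1, y) = true)) : Int)) := by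
  induction l generalizing n with
  | nil => simp
  | cons a l ih =>
    have h' : ∀ y ∈ l, (t1, y) ∈ vals → (pvGetSymbol sketch (t1, y)).isSome = true :=
      fun y hy => h y (List.mem_cons_of_mem _ hy)
    simp only [List.foldl_cons, List.countP_cons]
    by_cases hm : (t1, a) ∈ vals
    · have hs := h a (List.mem_cons_self) hm
      cases hsym : pvGetSymbol sketch (t1, a) with
      | none => rw [hsym] at hs; simp at hs
      | some c =>
        by_cases hc : c ∈ ['|', 'J', 'L']
        · have hstep : pvStepA vals sketch t1 (some n) a = some (n + 1) := by
            simp [pvStepA, hm, hsym, hc]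
          have hpa : decide ((t1, a) ∈ vals ∧ pvPipeAt sketch (t1, a) = true) = true := by
            simp [pvPipeAt, hm, hsym, hc]
          rw [hstep, ih _ h', hpa, if_pos rfl]
          simp only [Option.some.injEq]
          push_cast
          omega
        · have hstep : pvStepA vals sketch t1 (some n) a = some n := by
            simp [pvStepA, hm, hsym, hc]
          have hpa : decide ((t1, a) ∈ vals ∧ pvPipeAt sketch (t1, a) = true) = false := by
            simp [pvPipeAt, hsym, hc]
          rw [hstep, ih _ h', hpa]
          simp
    · have hstep : pvStepA vals sketch t1 (some n) a = some n := by
        simp [pvStepA, hm]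
      have hpa : decide ((t1, a) ∈ vals ∧ pvPipeAt sketch (t1, a) = true) = false := by
        simp [hm]
      rw [hstep, ih _ h', hpa]
      simp

-- parity of a successor count flips the boolean test
theorem pv_succ_parity (m : Nat) : ((m + 1) % 2 == 1) = !(m % 2 == 1) := by
  rcases Nat.mod_two_eq_zero_or_one m with h | h <;> simp [Nat.add_mod, h]

-- B's toggle fold over the distinct loop cells computes the parity of the same count
theorem pv_foldB (sketch : List String) (t1 t2 : Int)
    (l : List (Int × Int)) (b : Bool)
    (h : ∀ pos ∈ l, pos.1 = t1 → 0 ≤ pos.2 → pos.2 < t2 → (pvGetSymbol sketch pos).isSome = true) :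
    l.foldl (pvStepB sketch t1 t2) (some b)
    = some (b ^^ ((l.countP (fun pos => decide ((pos.1 = t1 ∧ 0 ≤ pos.2 ∧ pos.2 < t2) ∧ pvPipeAt sketch pos = true))) % 2 == 1)) := by
  induction l generalizing b with
  | nil => simp
  | cons a l ih =>
    have h' : ∀ pos ∈ l, pos.1 = t1 → 0 ≤ pos.2 → pos.2 < t2 → (pvGetSymbol sketch pos).isSome = true :=
      fun p hp => h p (List.mem_cons_of_mem _ hp)
    simp only [List.foldl_cons, List.countP_cons]
    by_cases hg : a.1 = t1 ∧ 0 ≤ a.2 ∧ a.2 < t2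
    · have hgb : (a.1 == t1 && decide (0 ≤ a.2) && decide (a.2 < t2)) = true := by
        simp [hg.1, hg.2.1, hg.2.2]
      have hs := h a (List.mem_cons_self) hg.1 hg.2.1 hg.2.2
      cases hsym : pvGetSymbol sketch a with
      | none => rw [hsym] at hs; simp at hs
      | some c =>
        have hsym' : ((PySem.List.pyGet? sketch a.1).bind
            (fun row => PySem.Str.pyGet? row a.2)) = some c := by
          unfold pvGetSymbol at hsym
          cases hrow : PySem.List.pyGet? sketch a.1 <;> rw [hrow] at hsym <;> simp_all
        by_cases hc : c ∈ ['|', 'J', 'L']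
        · have hstep : pvStepB sketch t1 t2 (some b) a = some (!b) := by
            simp only [pvStepB, Option.bind_some, hgb, if_true]
            rw [hsym']
            have hcs : c = '|' ∨ c = 'J' ∨ c = 'L' := by simpa using hc
            simp [hcs]
          have hpa : decide ((a.1 = t1 ∧ 0 ≤ a.2 ∧ a.2 < t2) ∧ pvPipeAt sketch a = true) = true := by
            simp [pvPipeAt, hg, hsym, hc]
          rw [hstep, ih _ h', hpa, if_pos rfl, pv_succ_parity]
          cases b <;> simp
        · have hstep : pvStepB sketch t1 t2 (some b) a = some b := by
            simp only [pvStepB, Option.bind_some, hgb, if_true]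
            rw [hsym']
            have hcs : ¬(c = '|' ∨ c = 'J' ∨ c = 'L') := by simpa using hc
            simp [hcs]
          have hpa : decide ((a.1 = t1 ∧ 0 ≤ a.2 ∧ a.2 < t2) ∧ pvPipeAt sketch a = true) = false := by
            simp [pvPipeAt, hsym, hc]
          rw [hstep, ih _ h', hpa]
          simp
    · have hgb : (a.1 == t1 && decide (0 ≤ a.2) && decide (a.2 < t2)) = false := by
        by_contra hne
        apply hg
        have := eq_true_of_ne_false hne
        simp only [Bool.and_eq_true, beq_iff_eq, decide_eq_true_eq] at this
        exact ⟨this.1.1, this.1.2, this.2⟩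
      have hstep : pvStepB sketch t1 t2 (some b) a = some b := by
        simp [pvStepB, hgb]
      have hpa : decide ((a.1 = t1 ∧ 0 ≤ a.2 ∧ a.2 < t2) ∧ pvPipeAt sketch a = true) = false := by
        simp [hg]
      rw [hstep, ih _ h', hpa]
      simp

-- the ray count over y = t2-1 .. 0 equals the count over the distinct loop cells
theorem pv_count_eq (vals : List (Int × Int)) (sketch : List String) (t1 t2 : Int) :
    (PySem.List.pyRange (t2 - 1) (-1) (-1)).countP
        (fun y => decide ((t1, y) ∈ vals ∧ pvPipeAt sketch (t1, y) = true))
    = (PySem.Set.ofList vals).countP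
        (fun pos => decide ((pos.1 = t1 ∧ 0 ≤ pos.2 ∧ pos.2 < t2) ∧ pvPipeAt sketch pos = true)) := by
  rw [List.countP_eq_length_filter, List.countP_eq_length_filter]
  have hlen : ((PySem.List.pyRange (t2 - 1) (-1) (-1)).filter
      (fun y => decide ((t1, y) ∈ vals ∧ pvPipeAt sketch (t1, y) = true))).length
      = (((PySem.List.pyRange (t2 - 1) (-1) (-1)).filter
      (fun y => decide ((t1, y) ∈ vals ∧ pvPipeAt sketch (t1, y) = true))).map
      (fun y => ((t1, y) : Int × Int))).length := by
    rw [List.length_map]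
  rw [hlen]
  apply List.Perm.length_eq
  rw [List.perm_ext_iff_of_nodup]
  · intro pos
    simp only [List.mem_map, List.mem_filter, PySem.List.mem_pyRange_neg_one,
      PySem.Set.mem_ofList, decide_eq_true_eq]
    constructor
    · rintro ⟨y, ⟨⟨hy1, hy2⟩, hv, hp⟩, rfl⟩
      exact ⟨hv, ⟨rfl, by omega, by omega⟩, hp⟩
    · rintro ⟨hv, ⟨h1, h2, h3⟩, hp⟩
      refine ⟨pos.2, ⟨⟨by omega, by omega⟩, ?_, ?_⟩, ?_⟩
      · rwa [← h1, Prod.mk.eta]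
      · rwa [← h1, Prod.mk.eta]
      · rw [← h1, Prod.mk.eta]
  · apply List.Nodup.map
    · intro x y hxy
      simpa using hxy
    · apply List.Nodup.filter
      rw [PySem.List.pyRange_neg_one_eq_reverse, List.nodup_reverse]
      exact PySem.List.nodup_pyRange_one _ _
  · exact (PySem.Set.nodup_ofList _).filter _

-- Pre_'s bind form implies the helper's match form
theorem pv_bind_isSome (sketch : List String) (pos : Int × Int)
    (h : ((PySem.List.pyGet? sketch pos.1).bind (fun row => PySem.Str.pyGet? row pos.2)).isSome = true) :
    (pvGetSymbol sketch pos).isSome = true := by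
  unfold pvGetSymbol
  cases hrow : PySem.List.pyGet? sketch pos.1 with
  | none => rw [hrow] at h; simp at h
  | some row => rw [hrow] at h; simpa using h

-- a Nat count's parity test reads the same over Int and over Nat
theorem pv_cast_parity (n : Nat) : (((n : Int)) % 2 == 1) = (n % 2 == 1) := by
  rcases Nat.mod_two_eq_zero_or_one n with h | h <;>
    · rw [show ((n : Int) % 2) = ((n % 2 : Nat) : Int) from (Int.natCast_mod n 2).symm, h]
      simp

-- ===== VERDICT (by name: the statement is the Claim_ definition above) =====
theorem is_enclosed_spec : Claim_equal_is_enclosed := by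
  intro tile path_loop sketch _hdom hpre
  unfold Spec_is_enclosed
  have e1 : is_enclosed tile path_loop sketch =
      (match (PySem.List.pyRange (tile.2 - 1) (-1) (-1)).foldl
          (pvStepA (PySem.Dict.values (PySem.Dict.ofList path_loop)) sketch tile.1)
          (some (0 : Int)) with
       | some n => n % 2 == 1
       | none => false) := rfl
  have e2 : is_enclosed_alt tile path_loop sketch =
      ((PySem.Set.ofList (PySem.Dict.values (PySem.Dict.ofList path_loop))).foldl
          (pvStepB sketch tile.1 tile.2) (some false)).getD false := rfl
  have hA := pv_foldA (PySem.Dict.values (PySem.Dict.ofList path_loop)) sketch tile.1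
    (PySem.List.pyRange (tile.2 - 1) (-1) (-1)) 0
    (by
      intro y hy hv
      rw [PySem.List.mem_pyRange_neg_one] at hy
      exact pv_bind_isSome sketch (tile.1, y) (hpre (tile.1, y) hv rfl (by omega) (by omega)))
  have hB := pv_foldB sketch tile.1 tile.2
    (PySem.Set.ofList (PySem.Dict.values (PySem.Dict.ofList path_loop))) false
    (by
      intro pos hpos h1 h2 h3
      rw [PySem.Set.mem_ofList] at hpos
      exact pv_bind_isSome sketch pos (hpre pos hpos h1 h2 h3))
  rw [e1, e2, hA, hB]
  simp only [Option.getD_some, Bool.false_xor, zero_add]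
  rw [pv_cast_parity, pv_count_eq (PySem.Dict.values (PySem.Dict.ofList path_loop)) sketch tile.1 tile.2]
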